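-- pv_equiv track=rewrite | github.com/aukustik/junior-python-developer-coding-task-master | combiner.py | find_coincidenses
-- ===== SOURCE A (Python) =====
-- def find_coincidenses(data) -> dict:
--     temp_data = {}
--     not_in_all = {}
--     for dictionary in data:
--         for key in dictionary.keys():
--             temp_data[key] = []
--     for key in temp_data.keys():
--         for dictionary in data:
--             if key in dictionary:
--                 temp_data.setdefault(key, []).append(dictionary[key])
--             else:
--                 not_in_all[key] = []
--     for key in not_in_all.keys():
--         del temp_data[key]
--     return temp_data
-- ===== SOURCE B (Python) =====
-- def find_coincidenses(data) -> dict: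
--     n = len(data)
--     counts = {}
--     values = {}
--     for dictionary in data:
--         for key, value in dictionary.items():
--             counts[key] = counts.get(key, 0) + 1
--             values.setdefault(key, []).append(value)
--     return {key: vals for key, vals in values.items() if counts[key] == n}
-- ===== Notes on version B (the rewrite author's own statement) =====
-- stated objective: faster
-- what changed: Replaces A's key-by-key rescan of every dict (collect all keys, then for each key scan all dicts again) by one single pass over all entries that counts each key's occurrences and accumulates its values, keeping keys whose count equals the number of dicts.
import Mathlib
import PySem

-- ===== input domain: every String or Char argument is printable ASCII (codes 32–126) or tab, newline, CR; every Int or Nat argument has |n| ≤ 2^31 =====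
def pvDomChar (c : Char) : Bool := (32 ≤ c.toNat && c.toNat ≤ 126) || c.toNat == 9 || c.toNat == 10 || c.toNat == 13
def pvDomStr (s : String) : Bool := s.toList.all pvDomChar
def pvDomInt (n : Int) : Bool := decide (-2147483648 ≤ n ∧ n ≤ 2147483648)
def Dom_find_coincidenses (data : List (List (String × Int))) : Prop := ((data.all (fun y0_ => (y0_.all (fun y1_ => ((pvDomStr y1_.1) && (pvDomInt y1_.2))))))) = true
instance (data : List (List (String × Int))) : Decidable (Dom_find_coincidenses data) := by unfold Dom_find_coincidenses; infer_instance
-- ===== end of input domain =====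

-- B replaces A's key-by-key rescan of all dicts by a single pass over all entries with an occurrence counter; equal return value on every input.

-- ===== PORT A =====
-- 'dictionary[key]' is reached only under 'key in dictionary', where getD is exact.
def find_coincidenses (data : List (List (String × Int))) : List (String × List Int) :=
  let dicts := data.map (fun l => PySem.Dict.ofList l)
  let temp0 : PySem.Dict String (List Int) :=
    dicts.foldl (fun t d => d.keys.foldl (fun t k => t.insert k ([] : List Int)) t) PySem.Dict.empty
  let st :=
    temp0.keys.foldl
      (fun (st : PySem.Dict String (List Int) × PySem.Dict String (List Int)) k =>
        dicts.foldl
          (fun st d =>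
            if d.contains k then (st.1.modify k [] (fun v => v ++ [d.getD k 0]), st.2)
            else (st.1, st.2.insert k ([] : List Int)))
          st)
      (temp0, PySem.Dict.empty)
  let fin := st.2.keys.foldl (fun t k => t.erase k) st.1
  fin.items

-- ===== PORT B =====
def find_coincidenses_alt (data : List (List (String × Int))) : List (String × List Int) :=
  let n := PySem.List.len data
  let st :=
    data.foldl
      (fun (st : PySem.Dict String Int × PySem.Dict String (List Int)) l =>
        (PySem.Dict.ofList l).items.foldl
          (fun st kv =>
            (st.1.insert kv.1 (st.1.getD kv.1 0 + 1),
             st.2.modify kv.1 [] (fun v => v ++ [kv.2])))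
          st)
      (PySem.Dict.empty, PySem.Dict.empty)
  st.2.items.filter (fun kv => st.1.getD kv.1 0 == n)

-- ===== PRECONDITION & SPEC =====
def Spec_find_coincidenses (data : List (List (String × Int))) (out : List (String × List Int)) : Prop := out = find_coincidenses_alt data
instance (data : List (List (String × Int))) (out : List (String × List Int)) : Decidable (Spec_find_coincidenses data out) := by unfold Spec_find_coincidenses; infer_instance

-- ===== CLAIM (what is proved, stated in full; the proofs are below) =====
def Claim_equal_find_coincidenses : Prop := ∀ (data : List (List (String × Int))), Dom_find_coincidenses data → Spec_find_coincidenses data (find_coincidenses data)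

-- ===== LEMMAS AND PROOFS =====

-- Proof-side canonical form both ports are reduced to: the distinct keys in first-appearance
-- order, kept iff present in every dict, paired with their values in dict order.
def pvDicts (data : List (List (String × Int))) : List (PySem.Dict String Int) :=
  data.map (fun l => PySem.Dict.ofList l)

def pvKeys (data : List (List (String × Int))) : List String :=
  PySem.Set.ofList ((pvDicts data).flatMap PySem.Dict.keys)

def pvAll (data : List (List (String × Int))) (k : String) : Bool :=
  (pvDicts data).all (fun d => d.contains k)

def pvVals (data : List (List (String × Int))) (k : String) : List Int :=
  ((pvDicts data).filter (fun d => d.contains k)).map (fun d => d.getD k 0)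

def pvTarget (data : List (List (String × Int))) : List (String × List Int) :=
  ((pvKeys data).filter (fun k => pvAll data k)).map (fun k => (k, pvVals data k))

theorem pv_dicts_nodup (data : List (List (String × Int))) :
    ∀ d ∈ pvDicts data, d.keys.Nodup := by
  intro d hd
  obtain ⟨l, -, rfl⟩ := List.mem_map.mp hd
  exact PySem.Dict.nodup_keys_ofList l

-- generic foldl shapes
theorem pv_foldl_prod_split {α β γ : Type} (l : List γ) (f : α → γ → α) (g : β → γ → β)
    (a : α) (b : β) :
    l.foldl (fun p x => (f p.1 x, g p.2 x)) (a, b) = (l.foldl f a, l.foldl g b) := by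
  induction l generalizing a b with
  | nil => rfl
  | cons x xs ih => simpa using ih (f a x) (g b x)

theorem pv_foldl_flat {α β γ : Type} (l : List γ) (h : γ → List β) (g : α → β → α) (a : α) :
    l.foldl (fun s x => (h x).foldl g s) a = (l.flatMap h).foldl g a := by
  induction l generalizing a with
  | nil => rfl
  | cons x xs ih => simp [List.flatMap_cons, List.foldl_append, ih]

-- per-dict facts about the flattened entry list
theorem pv_count_flat (ds : List (PySem.Dict String Int)) (k : String)
    (hn : ∀ d ∈ ds, d.keys.Nodup) :
    (ds.flatMap PySem.Dict.keys).count k = ds.countP (fun d => d.contains k) := by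
  induction ds with
  | nil => rfl
  | cons d ds ih =>
    rw [List.flatMap_cons, List.count_append, List.countP_cons,
      ih (fun d hd => hn d (by simp [hd]))]
    have hd := hn d (by simp)
    by_cases h : d.contains k
    · have hm : k ∈ d.keys := (PySem.Dict.contains_iff_mem_keys d k).mp h
      simp [h, List.count_eq_one_of_mem hd hm]; omega
    · have hm : k ∉ d.keys := fun hm => h ((PySem.Dict.contains_iff_mem_keys d k).mpr hm)
      simp [h, List.count_eq_zero.mpr hm]

theorem pv_items_filter_key (d : PySem.Dict String Int) (k : String) (hn : d.keys.Nodup) :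
    d.items.filter (fun p => p.1 == k) = if d.contains k then [(k, d.getD k 0)] else [] := by
  rw [PySem.Dict.items_eq_map_keys d hn 0, List.filter_map]
  have : ((fun p : String × Int => p.1 == k) ∘ fun k' => (k', d.getD k' 0)) = (fun k' => k' == k) := rfl
  rw [this, List.filter_beq]
  by_cases h : d.contains k
  · have hm : k ∈ d.keys := (PySem.Dict.contains_iff_mem_keys d k).mp h
    simp [h, List.count_eq_one_of_mem hn hm]
  · have hm : k ∉ d.keys := fun hm => h ((PySem.Dict.contains_iff_mem_keys d k).mpr hm)
    simp [h, List.count_eq_zero.mpr hm]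

theorem pv_vals_flat (ds : List (PySem.Dict String Int)) (k : String)
    (hn : ∀ d ∈ ds, d.keys.Nodup) :
    ((ds.flatMap PySem.Dict.items).filter (fun p => p.1 == k)).map (fun p => p.2)
      = (ds.filter (fun d => d.contains k)).map (fun d => d.getD k 0) := by
  induction ds with
  | nil => rfl
  | cons d ds ih =>
    rw [List.flatMap_cons, List.filter_append, List.map_append,
      ih (fun d hd => hn d (by simp [hd])), pv_items_filter_key d k (hn d (by simp))]
    by_cases h : d.contains k <;> simp [h]

-- ===== A-side: the three phases =====
theorem pv_phase1_keys_gen (ds : List (PySem.Dict String Int))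
    (t : PySem.Dict String (List Int)) :
    (ds.foldl (fun t d => d.keys.foldl (fun t k => t.insert k ([] : List Int)) t) t).keys
      = PySem.Set.update t.keys (ds.flatMap PySem.Dict.keys) := by
  induction ds generalizing t with
  | nil => simp [PySem.Set.update_nil]
  | cons d ds ih =>
    rw [List.foldl_cons, ih, List.flatMap_cons, PySem.Set.update_append]
    congr 1
    exact PySem.Dict.keys_foldl_insert d.keys (fun _ _ => []) t

theorem pv_ins_loop_getD (ks : List String) (t : PySem.Dict String (List Int))
    (h : ∀ k, t.getD k [] = []) (k : String) :
    (ks.foldl (fun t k => t.insert k ([] : List Int)) t).getD k [] = [] := by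
  induction ks generalizing t with
  | nil => exact h k
  | cons k0 ks ih =>
    refine ih _ (fun k' => ?_)
    rw [PySem.Dict.getD_insert]
    split <;> simp [h]

theorem pv_phase1_getD_gen (ds : List (PySem.Dict String Int))
    (t : PySem.Dict String (List Int)) (h : ∀ k, t.getD k [] = []) (k : String) :
    (ds.foldl (fun t d => d.keys.foldl (fun t k => t.insert k ([] : List Int)) t) t).getD k [] = [] := by
  induction ds generalizing t with
  | nil => exact h k
  | cons d ds ih => exact ih _ (fun k' => pv_ins_loop_getD d.keys t h k')

theorem pv_inner_split (dsL : List (PySem.Dict String Int)) (k : String)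
    (t s : PySem.Dict String (List Int)) :
    dsL.foldl
      (fun (st : PySem.Dict String (List Int) × PySem.Dict String (List Int)) d =>
        if d.contains k then (st.1.modify k [] (fun v => v ++ [d.getD k 0]), st.2)
        else (st.1, st.2.insert k ([] : List Int))) (t, s)
    = (dsL.foldl (fun t d => if d.contains k then t.modify k [] (fun v => v ++ [d.getD k 0]) else t) t,
       dsL.foldl (fun s d => if d.contains k then s else s.insert k ([] : List Int)) s) := by
  induction dsL generalizing t s with
  | nil => rfl
  | cons d ds ih => by_cases h : d.contains k <;> simp [h, ih]

theorem pv_phase2_split (dsL : List (PySem.Dict String Int)) (ks : List String)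
    (t s : PySem.Dict String (List Int)) :
    ks.foldl
      (fun (st : PySem.Dict String (List Int) × PySem.Dict String (List Int)) k =>
        dsL.foldl
          (fun st d =>
            if d.contains k then (st.1.modify k [] (fun v => v ++ [d.getD k 0]), st.2)
            else (st.1, st.2.insert k ([] : List Int))) st) (t, s)
    = (ks.foldl (fun t k => dsL.foldl (fun t d => if d.contains k then t.modify k [] (fun v => v ++ [d.getD k 0]) else t) t) t,
       ks.foldl (fun s k => dsL.foldl (fun s d => if d.contains k then s else s.insert k ([] : List Int)) s) s) := by
  induction ks generalizing t s with
  | nil => rfl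
  | cons k ks ih => rw [List.foldl_cons, pv_inner_split, ih]; rfl

theorem pv_innerT_getD_self (dsL : List (PySem.Dict String Int)) (k : String)
    (t : PySem.Dict String (List Int)) :
    (dsL.foldl (fun t d => if d.contains k then t.modify k [] (fun v => v ++ [d.getD k 0]) else t) t).getD k []
      = t.getD k [] ++ (dsL.filter (fun d => d.contains k)).map (fun d => d.getD k 0) := by
  induction dsL generalizing t with
  | nil => simp
  | cons d ds ih =>
    by_cases h : d.contains k <;>
      simp [h, ih, PySem.Dict.getD_modify_self]

theorem pv_innerT_getD_ne (dsL : List (PySem.Dict String Int)) (k k' : String) (hne : k' ≠ k)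
    (t : PySem.Dict String (List Int)) :
    (dsL.foldl (fun t d => if d.contains k then t.modify k [] (fun v => v ++ [d.getD k 0]) else t) t).getD k' []
      = t.getD k' [] := by
  induction dsL generalizing t with
  | nil => rfl
  | cons d ds ih =>
    by_cases h : d.contains k <;>
      simp [h, ih, PySem.Dict.getD_modify_of_ne _ _ _ hne]

theorem pv_innerT_keys (dsL : List (PySem.Dict String Int)) (k : String)
    (t : PySem.Dict String (List Int)) (hk : k ∈ t.keys) :
    (dsL.foldl (fun t d => if d.contains k then t.modify k [] (fun v => v ++ [d.getD k 0]) else t) t).keys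
      = t.keys := by
  induction dsL generalizing t with
  | nil => rfl
  | cons d ds ih =>
    by_cases h : d.contains k
    · have hc : t.contains k = true := (PySem.Dict.contains_iff_mem_keys t k).mpr hk
      have hkeys : (t.modify k [] (fun v => v ++ [d.getD k 0])).keys = t.keys := by
        rw [PySem.Dict.keys_modify, PySem.Dict.keys_insert_of_contains _ _ hc]
      rw [List.foldl_cons, if_pos h, ih _ (hkeys ▸ hk), hkeys]
    · simp [h, ih _ hk]

theorem pv_outerT_keys (dsL : List (PySem.Dict String Int)) (ks : List String)
    (t : PySem.Dict String (List Int)) (h : ∀ k ∈ ks, k ∈ t.keys) :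
    (ks.foldl (fun t k => dsL.foldl (fun t d => if d.contains k then t.modify k [] (fun v => v ++ [d.getD k 0]) else t) t) t).keys
      = t.keys := by
  induction ks generalizing t with
  | nil => rfl
  | cons k ks ih =>
    have hk1 := pv_innerT_keys dsL k t (h k (by simp))
    rw [List.foldl_cons, ih _ (fun k' hk' => hk1 ▸ h k' (by simp [hk'])), hk1]

theorem pv_outerT_getD (dsL : List (PySem.Dict String Int)) (ks : List String)
    (t : PySem.Dict String (List Int)) (hnd : ks.Nodup) (k : String) :
    (ks.foldl (fun t k => dsL.foldl (fun t d => if d.contains k then t.modify k [] (fun v => v ++ [d.getD k 0]) else t) t) t).getD k []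
      = if k ∈ ks then t.getD k [] ++ (dsL.filter (fun d => d.contains k)).map (fun d => d.getD k 0)
        else t.getD k [] := by
  induction ks generalizing t with
  | nil => simp
  | cons k0 ks ih =>
    rw [List.foldl_cons, ih _ hnd.of_cons]
    by_cases hk : k ∈ ks
    · have hne : k ≠ k0 := fun e => (List.nodup_cons.mp hnd).1 (e ▸ hk)
      simp [hk, hne, pv_innerT_getD_ne dsL k0 k hne]
    · by_cases he : k = k0
      · subst he
        simp [hk, pv_innerT_getD_self]
      · simp [hk, he, pv_innerT_getD_ne dsL k0 k he]

theorem pv_innerS (dsL : List (PySem.Dict String Int)) (k : String)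
    (s : PySem.Dict String (List Int)) :
    dsL.foldl (fun s d => if d.contains k then s else s.insert k ([] : List Int)) s
      = if dsL.all (fun d => d.contains k) then s else s.insert k [] := by
  induction dsL generalizing s with
  | nil => simp
  | cons d ds ih =>
    by_cases h : d.contains k
    · simp [h, ih]
    · simp [h, ih, PySem.Dict.insert_insert_self]

theorem pv_outerS_keys (dsL : List (PySem.Dict String Int)) (ks : List String)
    (s : PySem.Dict String (List Int)) (hnd : ks.Nodup)
    (hf : ∀ k ∈ ks, s.contains k = false) :
    (ks.foldl (fun s k => dsL.foldl (fun s d => if d.contains k then s else s.insert k ([] : List Int)) s) s).keys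
      = s.keys ++ ks.filter (fun k => !dsL.all (fun d => d.contains k)) := by
  induction ks generalizing s with
  | nil => simp
  | cons k0 ks ih =>
    rw [List.foldl_cons, pv_innerS]
    by_cases ha : dsL.all (fun d => d.contains k0)
    · rw [if_pos ha, ih _ hnd.of_cons (fun k hk => hf k (by simp [hk]))]
      simp [ha]
    · rw [if_neg ha, ih _ hnd.of_cons]
      · rw [PySem.Dict.keys_insert_of_not_contains _ _ (hf k0 (by simp))]
        simp [ha]
      · intro k hk
        have hne : k ≠ k0 := fun e => (List.nodup_cons.mp hnd).1 (e ▸ hk)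
        rw [PySem.Dict.contains_insert]
        simp [hne, hf k (by simp [hk])]

theorem pv_foldl_erase_items (l : List String) (t : PySem.Dict String (List Int)) :
    (l.foldl (fun t k => t.erase k) t).items
      = t.items.filter (fun p => !l.contains p.1) := by
  induction l generalizing t with
  | nil => simp
  | cons k l ih =>
    rw [List.foldl_cons, ih]
    show (PySem.Dict.mk _).items.filter _ = _
    simp only [List.filter_filter]
    apply List.filter_congr
    intro p _
    by_cases h : p.1 = k <;> simp [h]

theorem pv_A_eq (data : List (List (String × Int))) :
    find_coincidenses data = pvTarget data := by
  unfold find_coincidenses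
  simp only
  rw [show List.map (fun l => PySem.Dict.ofList l) data = pvDicts data from rfl]
  set temp0 := (pvDicts data).foldl
      (fun t d => d.keys.foldl (fun t k => t.insert k ([] : List Int)) t)
      PySem.Dict.empty with htemp0
  have hK : temp0.keys = pvKeys data := by
    rw [htemp0, pv_phase1_keys_gen, PySem.Dict.keys_empty, PySem.Set.update_nil_left, pvKeys]
  have hKnd : temp0.keys.Nodup := by rw [hK, pvKeys]; exact PySem.Set.nodup_ofList _
  have hT0 : ∀ k, temp0.getD k [] = [] :=
    pv_phase1_getD_gen _ _ (fun k => PySem.Dict.getD_empty k [])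
  rw [pv_phase2_split]
  set T := temp0.keys.foldl
      (fun t k => (pvDicts data).foldl (fun t d => if d.contains k then t.modify k [] (fun v => v ++ [d.getD k 0]) else t) t)
      temp0 with hT
  set S := temp0.keys.foldl
      (fun s k => (pvDicts data).foldl (fun s d => if d.contains k then s else s.insert k ([] : List Int)) s)
      PySem.Dict.empty with hS
  have hTkeys : T.keys = temp0.keys := pv_outerT_keys _ _ _ (fun k hk => hk)
  have hTnd : T.keys.Nodup := by rw [hTkeys]; exact hKnd
  have hSkeys : S.keys = (pvKeys data).filter (fun k => !pvAll data k) := by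
    rw [hS, pv_outerS_keys _ _ _ hKnd (fun k _ => PySem.Dict.contains_empty k),
      PySem.Dict.keys_empty, List.nil_append, hK]
    rfl
  rw [pv_foldl_erase_items, PySem.Dict.items_eq_map_keys T hTnd [], hTkeys, hK, List.filter_map]
  have hpred : ∀ k ∈ pvKeys data,
      (((fun p : String × List Int => !S.keys.contains p.1) ∘ (fun k => (k, T.getD k []))) k) = pvAll data k := by
    intro k hk
    show (!S.keys.contains k) = pvAll data k
    by_cases hall : pvAll data k = true
    · have hnm : k ∉ S.keys := by rw [hSkeys]; simp [List.mem_filter, hall]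
      have : S.keys.contains k = false := by
        by_contra hc
        exact hnm (List.contains_iff_mem.mp (by revert hc; cases S.keys.contains k <;> simp))
      rw [this, hall]; rfl
    · have hall' : pvAll data k = false := Bool.not_eq_true _ ▸ (by simpa using hall)
      have hm : k ∈ S.keys := by
        rw [hSkeys]; exact List.mem_filter.mpr ⟨hk, by rw [hall']; rfl⟩
      rw [List.contains_iff_mem.mpr hm, hall']; rfl
  rw [List.filter_congr hpred]
  apply List.map_congr_left
  intro k hk
  have hkK : k ∈ temp0.keys := by rw [hK]; exact (List.mem_filter.mp hk).1
  rw [pv_outerT_getD _ _ _ hKnd, if_pos hkK, hT0]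
  rfl

-- ===== B-side =====
theorem pv_flatB (data : List (List (String × Int))) :
    data.flatMap (fun l => (PySem.Dict.ofList l).items) = (pvDicts data).flatMap PySem.Dict.items := by
  rw [pvDicts, List.flatMap_map]

theorem pv_flatB_keys (data : List (List (String × Int))) :
    (data.flatMap (fun l => (PySem.Dict.ofList l).items)).map (fun p => p.1)
      = (pvDicts data).flatMap PySem.Dict.keys := by
  rw [pv_flatB, List.map_flatMap]; rfl

theorem pv_all_iff (data : List (List (String × Int))) (k : String) :
    ((((pvDicts data).flatMap PySem.Dict.keys).count k : Int) == PySem.List.len data) = pvAll data k := by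
  rw [PySem.List.len_eq, pv_count_flat _ _ (pv_dicts_nodup data), Bool.beq_eq_decide_eq]
  have hlen : data.length = (pvDicts data).length := by simp [pvDicts]
  by_cases h : pvAll data k = true
  · have := List.countP_eq_length.mpr (List.all_eq_true.mp h)
    simp [h, this, hlen]
  · rw [Bool.not_eq_true] at h
    rw [h, decide_eq_false]
    intro he
    have : (pvDicts data).countP (fun d => d.contains k) = (pvDicts data).length := by
      have := Int.ofNat_inj.mp he; omega
    exact absurd (List.all_eq_true.mpr (List.countP_eq_length.mp this))
      (by rw [show ((pvDicts data).all fun d => d.contains k) = false from h]; simp)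

theorem pv_B_eq (data : List (List (String × Int))) :
    find_coincidenses_alt data = pvTarget data := by
  unfold find_coincidenses_alt
  rw [pv_foldl_flat data (fun l => (PySem.Dict.ofList l).items)
      (fun (st : PySem.Dict String Int × PySem.Dict String (List Int)) kv =>
        (st.1.insert kv.1 (st.1.getD kv.1 0 + 1), st.2.modify kv.1 [] (fun v => v ++ [kv.2])))
      (PySem.Dict.empty, PySem.Dict.empty),
    pv_foldl_prod_split _ (fun (d : PySem.Dict String Int) (kv : String × Int) => d.insert kv.1 (d.getD kv.1 0 + 1)) (fun (d : PySem.Dict String (List Int)) (kv : String × Int) => d.modify kv.1 [] (fun v => v ++ [kv.2])) PySem.Dict.empty PySem.Dict.empty]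
  show (List.filter _ (PySem.Dict.items _)) = _
  set flatB := data.flatMap (fun l => (PySem.Dict.ofList l).items) with hflatB
  set counts := flatB.foldl (fun (d : PySem.Dict String Int) (kv : String × Int) => d.insert kv.1 (d.getD kv.1 0 + 1)) PySem.Dict.empty with hcounts
  set values := flatB.foldl (fun (d : PySem.Dict String (List Int)) (kv : String × Int) => d.modify kv.1 [] (fun v => v ++ [kv.2])) PySem.Dict.empty with hvalues
  have hkeys : values.keys = pvKeys data := by
    rw [hvalues, PySem.Dict.keys_foldl_modify_key flatB (fun kv => kv.1) []
        (fun _ kv => fun v => v ++ [kv.2]) PySem.Dict.empty,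
      PySem.Dict.keys_empty, PySem.Set.update_nil_left, hflatB, pv_flatB_keys, pvKeys]
  have hnd : values.keys.Nodup := by
    rw [hkeys, pvKeys]; exact PySem.Set.nodup_ofList _
  have hc : ∀ k, (counts.getD k 0 == PySem.List.len data) = pvAll data k := by
    intro k
    rw [hcounts, show (fun (d : PySem.Dict String Int) (kv : String × Int) => d.insert kv.1 (d.getD kv.1 0 + 1))
        = (fun (d : PySem.Dict String Int) (x : String × Int) =>
            (fun (d : PySem.Dict String Int) (y : String) => d.insert y (d.getD y 0 + 1)) d ((fun p : String × Int => p.1) x)) from rfl,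
      ← List.foldl_map (f := fun p : String × Int => p.1) (g := fun (d : PySem.Dict String Int) (y : String) => d.insert y (d.getD y 0 + 1)) (l := flatB) (init := PySem.Dict.empty),
      PySem.Dict.getD_foldl_insert_add_one, PySem.Dict.getD_empty,
      hflatB, pv_flatB_keys, zero_add, pv_all_iff]
  have hv : ∀ k, values.getD k [] = pvVals data k := by
    intro k
    rw [hvalues, PySem.Dict.getD_foldl_modify_append, PySem.Dict.getD_empty,
      hflatB, pv_flatB, pv_vals_flat _ _ (pv_dicts_nodup data), pvVals]
    simp
  rw [PySem.Dict.items_eq_map_keys values hnd [], List.filter_map, hkeys]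
  rw [show ((fun kv : String × List Int => counts.getD kv.1 0 == PySem.List.len data)
        ∘ (fun k => (k, values.getD k []))) = fun k => pvAll data k from funext fun k => hc k]
  rw [show (fun k => (k, values.getD k [])) = fun k => (k, pvVals data k) from funext fun k => by rw [hv k]]
  rfl

-- ===== VERDICT (by name: the statement is the Claim_ definition above) =====
theorem find_coincidenses_spec : Claim_equal_find_coincidenses := by
  intro data _
  show find_coincidenses data = find_coincidenses_alt data
  rw [pv_A_eq, pv_B_eq]
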